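-- pv_equiv track=rewrite | github.com/Knapp-Kevin/bicameral-mcp | handlers/analysis.py | _descriptions_conflict
-- ===== SOURCE A (Python) =====
-- _NEGATION_PAIRS: list[tuple[str, str]] = [
--     ("redis", "local memory"),
--     ("redis", "in-memory"),
--     ("redis", "in memory"),
--     ("oauth", "basic auth"),
--     ("jwt", "session cookie"),
--     ("jwt", "session cookies"),
--     ("synchronous", "async"),
--     ("sync", "async"),
--     ("block", "allow"),
--     ("enable", "disable"),
--     ("required", "optional"),
--     ("mandatory", "optional"),
--     ("reject", "accept"),
--     ("whitelist", "blacklist"),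
--     ("opt-in", "opt-out"),
-- ]
--
-- _DIVERGENCE_TOKENS = {
--     " vs ",
--     " vs. ",
--     " or ",
--     "instead of",
--     "rather than",
-- }
--
-- def _descriptions_conflict(descriptions: list[str]) -> bool:
--     lower = [d.lower() for d in descriptions]
--     for i, a in enumerate(lower):
--         for b in lower[i + 1 :]:
--             for left, right in _NEGATION_PAIRS:
--                 if (left in a and right in b) or (left in b and right in a):
--                     return True
--             if any(tok in a or tok in b for tok in _DIVERGENCE_TOKENS):
--                 return True
--     return False
-- ===== SOURCE B (Python) =====
-- _NEGATION_PAIRS: list[tuple[str, str]] = [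
--     ("redis", "local memory"),
--     ("redis", "in-memory"),
--     ("redis", "in memory"),
--     ("oauth", "basic auth"),
--     ("jwt", "session cookie"),
--     ("jwt", "session cookies"),
--     ("synchronous", "async"),
--     ("sync", "async"),
--     ("block", "allow"),
--     ("enable", "disable"),
--     ("required", "optional"),
--     ("mandatory", "optional"),
--     ("reject", "accept"),
--     ("whitelist", "blacklist"),
--     ("opt-in", "opt-out"),
-- ]
--
-- _DIVERGENCE_TOKENS = {
--     " vs ",
--     " vs. ",
--     " or ",
--     "instead of",
--     "rather than",
-- }
--
--
-- def _descriptions_conflict(descriptions: list[str]) -> bool: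
--     # Single pass per keyword pair instead of scanning all O(n^2) string pairs.
--     lower = [d.lower() for d in descriptions]
--     if len(lower) < 2:
--         return False
--     if any(tok in d for d in lower for tok in _DIVERGENCE_TOKENS):
--         return True
--     for left, right in _NEGATION_PAIRS:
--         seen_left = seen_right = False
--         for d in lower:
--             has_left = left in d
--             has_right = right in d
--             if (has_left and seen_right) or (has_right and seen_left):
--                 return True
--             seen_left = seen_left or has_left
--             seen_right = seen_right or has_right
--     return False
-- ===== Notes on version B (the rewrite author's own statement) =====
-- stated objective: faster
-- what changed: Replaces the O(n^2) scan over all string pairs (re-testing every keyword on each pair) by a length check, one pass for the divergence tokens, and one pass per negation pair carrying seen-left/seen-right flags.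
import Mathlib
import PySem

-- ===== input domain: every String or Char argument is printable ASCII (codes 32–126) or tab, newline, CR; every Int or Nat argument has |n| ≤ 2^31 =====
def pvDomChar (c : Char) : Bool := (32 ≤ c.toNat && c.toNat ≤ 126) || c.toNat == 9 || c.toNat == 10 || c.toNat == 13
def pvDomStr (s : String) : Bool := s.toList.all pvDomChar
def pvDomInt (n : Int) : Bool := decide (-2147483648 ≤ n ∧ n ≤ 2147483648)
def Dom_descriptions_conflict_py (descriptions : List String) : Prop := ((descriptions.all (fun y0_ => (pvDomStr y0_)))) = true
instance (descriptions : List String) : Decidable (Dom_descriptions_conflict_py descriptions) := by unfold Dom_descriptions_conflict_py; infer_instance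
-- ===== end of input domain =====

-- B replaces A's O(n^2) scan over all string pairs by one pass per keyword pair
-- tracking seen-left/seen-right flags (objective: faster, O(n*k) vs O(n^2*k)).

-- shared module constants (_NEGATION_PAIRS, _DIVERGENCE_TOKENS)
def pvPairs : List (String × String) :=
  [("redis", "local memory"), ("redis", "in-memory"), ("redis", "in memory"),
   ("oauth", "basic auth"), ("jwt", "session cookie"), ("jwt", "session cookies"),
   ("synchronous", "async"), ("sync", "async"), ("block", "allow"),
   ("enable", "disable"), ("required", "optional"), ("mandatory", "optional"),
   ("reject", "accept"), ("whitelist", "blacklist"), ("opt-in", "opt-out")]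

-- the Python set literal; iteration order only feeds an `any`, so a list is exact
def pvTokens : List String := [" vs ", " vs. ", " or ", "instead of", "rather than"]

-- ===== PORT A =====
-- body of A's inner loop for a fixed pair (a, b): the pair loop with early
-- `return True` is `any`, then the `any(tok in a or tok in b ...)` check
def pvTrig (a b : String) : Bool :=
  (pvPairs.any (fun p => (PySem.Str.isIn p.1 a && PySem.Str.isIn p.2 b) ||
                         (PySem.Str.isIn p.1 b && PySem.Str.isIn p.2 a))) ||
  pvTokens.any (fun t => PySem.Str.isIn t a || PySem.Str.isIn t b)

-- `for i, a in enumerate(lower): for b in lower[i+1:]`: at position i the inner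
-- list is the tail after a, so the nested loop is this structural recursion
def pvOuter : List String → Bool
  | [] => false
  | a :: rest => rest.any (pvTrig a) || pvOuter rest

def descriptions_conflict_py (descriptions : List String) : Bool :=
  pvOuter (descriptions.map PySem.Str.lower)

-- ===== PORT B =====
-- Source B's inner loop over `lower` for one pair, with the two seen flags as state
def pvScan (l r : String) : List String → Bool → Bool → Bool
  | [], _, _ => false
  | d :: rest, sl, sr =>
    let hl := PySem.Str.isIn l d
    let hr := PySem.Str.isIn r d
    if (hl && sr) || (hr && sl) then true
    else pvScan l r rest (sl || hl) (sr || hr)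

def descriptions_conflict_py_alt (descriptions : List String) : Bool :=
  let lower := descriptions.map PySem.Str.lower
  if lower.length < 2 then false
  else if lower.any (fun d => pvTokens.any (fun t => PySem.Str.isIn t d)) then true
  else pvPairs.any (fun p => pvScan p.1 p.2 lower false false)

-- ===== PRECONDITION & SPEC =====
def Spec_descriptions_conflict_py (descriptions : List String) (out : Bool) : Prop := out = descriptions_conflict_py_alt descriptions
instance (descriptions : List String) (out : Bool) : Decidable (Spec_descriptions_conflict_py descriptions out) := by unfold Spec_descriptions_conflict_py; infer_instance

-- ===== CLAIM (what is proved, stated in full; the proofs are below) =====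
def Claim_equal_descriptions_conflict_py : Prop := ∀ (descriptions : List String), Dom_descriptions_conflict_py descriptions → Spec_descriptions_conflict_py descriptions (descriptions_conflict_py descriptions)

-- ===== LEMMAS AND PROOFS =====

-- [x, y] is a sublist of a :: l iff it starts at the head or lies in the tail
theorem pv_pair_sublist {α : Type} (x y a : α) (l : List α) :
    List.Sublist [x, y] (a :: l) ↔ (x = a ∧ y ∈ l) ∨ List.Sublist [x, y] l := by
  constructor
  · intro h
    cases h with
    | cons _ h' => exact Or.inr h'
    | cons₂ _ h' => exact Or.inl ⟨rfl, List.singleton_sublist.mp h'⟩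
  · rintro (⟨rfl, hy⟩ | h)
    · exact List.Sublist.cons₂ _ (List.singleton_sublist.mpr hy)
    · exact h.cons _

-- A's nested loop fires exactly on some ordered pair of elements of the list
theorem pv_outer_iff (l : List String) :
    pvOuter l = true ↔ ∃ x y, List.Sublist [x, y] l ∧ pvTrig x y = true := by
  induction l with
  | nil => simp [pvOuter]
  | cons a rest ih =>
    simp only [pvOuter, Bool.or_eq_true, List.any_eq_true, ih]
    constructor
    · rintro (⟨y, hy, ht⟩ | ⟨x, y, hs, ht⟩)
      · exact ⟨a, y, (pv_pair_sublist a y a rest).mpr (Or.inl ⟨rfl, hy⟩), ht⟩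
      · exact ⟨x, y, (pv_pair_sublist x y a rest).mpr (Or.inr hs), ht⟩
    · rintro ⟨x, y, hs, ht⟩
      rcases (pv_pair_sublist x y a rest).mp hs with ⟨rfl, hy⟩ | hs'
      · exact Or.inl ⟨y, hy, ht⟩
      · exact Or.inr ⟨x, y, hs', ht⟩

-- B's flagged scan fires exactly on an ordered pair inside xs, or an element of
-- xs combining with an already-set flag
theorem pv_scan_iff (l r : String) (xs : List String) : ∀ sl sr : Bool,
    pvScan l r xs sl sr = true ↔
      (∃ x y, List.Sublist [x, y] xs ∧
        ((PySem.Str.isIn l x && PySem.Str.isIn r y) ||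
         (PySem.Str.isIn l y && PySem.Str.isIn r x)) = true) ∨
      (∃ y ∈ xs, ((sr && PySem.Str.isIn l y) || (sl && PySem.Str.isIn r y)) = true) := by
  induction xs with
  | nil => simp [pvScan]
  | cons d rest ih =>
    intro sl sr
    simp only [pvScan]
    split
    · rename_i hfire
      simp only [Bool.or_eq_true, Bool.and_eq_true] at hfire
      simp only [true_iff, Bool.or_eq_true, Bool.and_eq_true]
      refine Or.inr ⟨d, List.mem_cons_self, ?_⟩
      tauto
    · rename_i hfire
      rw [ih]
      simp only [Bool.or_eq_true, Bool.and_eq_true]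
      constructor
      · rintro (⟨x, y, hs, ht⟩ | ⟨y, hy, ht⟩)
        · exact Or.inl ⟨x, y, hs.cons d, ht⟩
        · rcases ht with ⟨hsr | hrd, hly⟩ | ⟨hsl | hld, hry⟩
          · exact Or.inr ⟨y, List.mem_cons_of_mem d hy, Or.inl ⟨hsr, hly⟩⟩
          · exact Or.inl ⟨d, y, (pv_pair_sublist d y d rest).mpr (Or.inl ⟨rfl, hy⟩),
              Or.inr ⟨hly, hrd⟩⟩
          · exact Or.inr ⟨y, List.mem_cons_of_mem d hy, Or.inr ⟨hsl, hry⟩⟩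
          · exact Or.inl ⟨d, y, (pv_pair_sublist d y d rest).mpr (Or.inl ⟨rfl, hy⟩),
              Or.inl ⟨hld, hry⟩⟩
      · rintro (⟨x, y, hs, ht⟩ | ⟨y, hy, ht⟩)
        · rcases (pv_pair_sublist x y d rest).mp hs with ⟨rfl, hy⟩ | hs'
          · refine Or.inr ⟨y, hy, ?_⟩; tauto
          · exact Or.inl ⟨x, y, hs', ht⟩
        · rcases List.mem_cons.mp hy with rfl | hy'
          · exact absurd (by simp only [Bool.or_eq_true, Bool.and_eq_true]; tauto) hfire
          · refine Or.inr ⟨y, hy', ?_⟩; tauto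

-- a divergence token somewhere in a list of length ≥ 2 is the same as a token
-- in one component of some ordered pair
theorem pv_tok_iff (l : List String) (h2 : 2 ≤ l.length) :
    ((∃ x y, List.Sublist [x, y] l ∧
        (pvTokens.any (fun t => PySem.Str.isIn t x || PySem.Str.isIn t y)) = true) ↔
      ∃ d ∈ l, (pvTokens.any (fun t => PySem.Str.isIn t d)) = true) := by
  constructor
  · rintro ⟨x, y, hs, ht⟩
    simp only [List.any_eq_true, Bool.or_eq_true] at ht
    rcases ht with ⟨t, htm, hx | hy⟩
    · exact ⟨x, hs.subset (by simp), List.any_eq_true.mpr ⟨t, htm, hx⟩⟩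
    · exact ⟨y, hs.subset (by simp), List.any_eq_true.mpr ⟨t, htm, hy⟩⟩
  · rintro ⟨d, hd, ht⟩
    match l, h2 with
    | a :: b :: rest, _ =>
      rcases List.mem_cons.mp hd with rfl | hd'
      · refine ⟨d, b, ?_, ?_⟩
        · exact (pv_pair_sublist d b d (b :: rest)).mpr (Or.inl ⟨rfl, by simp⟩)
        · simp only [List.any_eq_true, Bool.or_eq_true] at ht ⊢
          rcases ht with ⟨t, htm, hx⟩; exact ⟨t, htm, Or.inl hx⟩
      · refine ⟨a, d, (pv_pair_sublist a d a (b :: rest)).mpr (Or.inl ⟨rfl, hd'⟩), ?_⟩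
        simp only [List.any_eq_true, Bool.or_eq_true] at ht ⊢
        rcases ht with ⟨t, htm, hx⟩; exact ⟨t, htm, Or.inr hx⟩

-- ===== VERDICT (by name: the statement is the Claim_ definition above) =====
theorem descriptions_conflict_py_spec : Claim_equal_descriptions_conflict_py := by
  intro descriptions _
  unfold Spec_descriptions_conflict_py descriptions_conflict_py descriptions_conflict_py_alt
  set l := descriptions.map PySem.Str.lower with hldef
  by_cases h2 : l.length < 2
  · simp only [if_pos h2]
    rw [Bool.eq_false_iff]
    intro hA
    rcases (pv_outer_iff l).mp hA with ⟨x, y, hs, -⟩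
    have := hs.length_le
    simp at this; omega
  · simp only [if_neg h2]
    have h2 : 2 ≤ l.length := by omega
    rw [Bool.eq_iff_iff, pv_outer_iff]
    by_cases htokany : (l.any (fun d => pvTokens.any (fun t => PySem.Str.isIn t d))) = true
    · rw [if_pos htokany]
      constructor
      · intro _; rfl
      · intro _
        rcases (pv_tok_iff l h2).mpr (List.any_eq_true.mp htokany) with ⟨x, y, hs, ht⟩
        exact ⟨x, y, hs, by simp only [pvTrig, Bool.or_eq_true]; exact Or.inr ht⟩
    · rw [if_neg htokany, List.any_eq_true]
      constructor
      · rintro ⟨x, y, hs, ht⟩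
        simp only [pvTrig, Bool.or_eq_true] at ht
        rcases ht with hpair | htok
        · rcases List.any_eq_true.mp hpair with ⟨p, hp, hpt⟩
          exact ⟨p, hp, (pv_scan_iff p.1 p.2 l false false).mpr (Or.inl ⟨x, y, hs, hpt⟩)⟩
        · exact absurd (List.any_eq_true.mpr ((pv_tok_iff l h2).mp ⟨x, y, hs, htok⟩)) htokany
      · rintro ⟨p, hp, hscan⟩
        rcases (pv_scan_iff p.1 p.2 l false false).mp hscan with ⟨x, y, hs, ht⟩ | ⟨y, -, hbad⟩
        · refine ⟨x, y, hs, ?_⟩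
          simp only [pvTrig, Bool.or_eq_true]
          exact Or.inl (List.any_eq_true.mpr ⟨p, hp, ht⟩)
        · simp at hbad
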